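-- pv_equiv track=rewrite | github.com/sdey-ping/competitive-intel-agent | ui/pages/evaluate.py | _section_has_content
-- ===== SOURCE A (Python) =====
-- _IRRELEVANT_MARKERS = [
--     "not directly relevant to this research focus",
--     "not found in available sources",
--     "not applicable",
--     "not relevant to this research",
--     "no data retrieved",
--     "not directly applicable",
--     "this section is not relevant",
-- ]
--
-- def _section_has_content(text: str) -> bool:
--     """True only if section has substantive, research-relevant content (not filler)."""
--     if not text or len(text.strip()) < 150:
--         return False
--     lower = text.lower().strip()
--     for marker in _IRRELEVANT_MARKERS:
--         if lower.startswith(marker):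
--             return False
--         # Also catch it anywhere in the first 300 chars (GPT sometimes preambles)
--         if marker in lower[:300]:
--             return False
--     return True
-- ===== SOURCE B (Python) =====
-- _IRRELEVANT_MARKERS = [
--     "not directly relevant to this research focus",
--     "not found in available sources",
--     "not applicable",
--     "not relevant to this research",
--     "no data retrieved",
--     "not directly applicable",
--     "this section is not relevant",
-- ]
--
-- # Trie node = (char, stop, child, sibling); None = empty trie.
-- # Children of a node form a sibling chain (first-child / next-sibling encoding).
-- def _insert(node, word):
--     if not word:
--         return node
--     c, rest = word[0], word[1:]
--     if node is None:
--         return (c, not rest, _insert(None, rest), None)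
--     ch, stop, child, sib = node
--     if c == ch:
--         return (ch, stop or not rest, _insert(child, rest), sib)
--     return (ch, stop, child, _insert(sib, word))
--
-- _TRIE = None
-- for _m in _IRRELEVANT_MARKERS:
--     _TRIE = _insert(_TRIE, _m)
--
-- def _match(node, chars):
--     """True iff some trie word is a prefix of chars."""
--     if node is None or not chars:
--         return False
--     c = chars[0]
--     ch, stop, child, sib = node
--     if c == ch:
--         return stop or _match(child, chars[1:])
--     return _match(sib, chars)
--
-- def _section_has_content(text: str) -> bool:
--     """True only if section has substantive, research-relevant content (not filler)."""
--     stripped = text.strip()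
--     if len(stripped) < 150:
--         return False
--     window = stripped.lower()[:300]
--     return not any(_match(_TRIE, window[i:]) for i in range(len(window)))
-- ===== Notes on version B (the rewrite author's own statement) =====
-- stated objective: alternative
-- what changed: Replaces A's per-marker loop (startswith plus a substring scan of the 300-char window for each of the 7 markers) by a prefix trie of the markers built once at module level and walked from each position of the window, so no per-marker substring scans remain.
import Mathlib
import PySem

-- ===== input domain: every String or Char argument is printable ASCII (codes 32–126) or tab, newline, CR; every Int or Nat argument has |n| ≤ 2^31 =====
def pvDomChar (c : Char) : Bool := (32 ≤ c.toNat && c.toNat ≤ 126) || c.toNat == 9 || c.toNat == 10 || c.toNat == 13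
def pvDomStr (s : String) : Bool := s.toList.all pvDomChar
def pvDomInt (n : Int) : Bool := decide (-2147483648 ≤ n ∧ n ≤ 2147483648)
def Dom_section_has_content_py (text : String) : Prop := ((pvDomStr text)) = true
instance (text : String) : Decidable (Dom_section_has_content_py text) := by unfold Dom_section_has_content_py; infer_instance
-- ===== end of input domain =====

-- B replaces A's per-marker scanning (startswith + substring scan of the 300-char window for
-- each marker) by a prefix trie of the markers, built once and walked from each window position.

def pvMarkers : List String := [
  "not directly relevant to this research focus",
  "not found in available sources",
  "not applicable",
  "not relevant to this research",
  "no data retrieved",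
  "not directly applicable",
  "this section is not relevant"
]

-- ===== PORT A =====
def section_has_content_py (text : String) : Bool :=
  if text == "" || PySem.Str.len (PySem.Str.strip text) < 150 then false
  else
    let lower := PySem.Str.strip (PySem.Str.lower text)
    pvMarkers.foldl
      (fun ok marker =>
        if PySem.Str.startswith lower marker then false
        else if PySem.Str.isIn marker (PySem.Str.slice lower none (some 300)) then false
        else ok) true

-- ===== PORT B =====
-- Trie node = (char, stop, child, sibling) in first-child / next-sibling encoding; nil = empty.
inductive PvTrie : Type
  | nil : PvTrie
  | node : Char → Bool → PvTrie → PvTrie → PvTrie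
deriving DecidableEq, Repr

def pvInsert : PvTrie → List Char → PvTrie
  | t, [] => t
  | .nil, c :: cs => .node c cs.isEmpty (pvInsert .nil cs) .nil
  | .node ch stop child sib, c :: cs =>
      if c = ch then .node ch (stop || cs.isEmpty) (pvInsert child cs) sib
      else .node ch stop child (pvInsert sib (c :: cs))
  termination_by t m => (m.length, sizeOf t)
  decreasing_by all_goals simp_all; omega

def pvTrie : PvTrie := pvMarkers.foldl (fun t m => pvInsert t m.toList) .nil

-- True iff some word stored in the trie is a prefix of `chars`.
def pvMatch : PvTrie → List Char → Bool
  | .nil, _ => false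
  | .node _ _ _ _, [] => false
  | .node ch stop child sib, c :: rest =>
      if c = ch then stop || pvMatch child rest
      else pvMatch sib (c :: rest)
  termination_by t cs => (cs.length, sizeOf t)
  decreasing_by all_goals simp_all; omega

def section_has_content_py_alt (text : String) : Bool :=
  let stripped := PySem.Chars.strip text.toList
  if stripped.length < 150 then false
  else
    let window := PySem.Chars.slice (PySem.Chars.lower stripped) none (some 300)
    !(List.range window.length).any fun i => pvMatch pvTrie (window.drop i)

-- ===== PRECONDITION & SPEC =====
def Spec_section_has_content_py (text : String) (out : Bool) : Prop := out = section_has_content_py_alt text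
instance (text : String) (out : Bool) : Decidable (Spec_section_has_content_py text out) := by unfold Spec_section_has_content_py; infer_instance

-- ===== CLAIM (what is proved, stated in full; the proofs are below) =====
def Claim_equal_section_has_content_py : Prop := ∀ (text : String), Dom_section_has_content_py text → Spec_section_has_content_py text (section_has_content_py text)

-- ===== LEMMAS AND PROOFS =====

lemma pv_isspace_lowerChar (c : Char) :
    PySem.Chars.isspace (PySem.Chars.lowerChar c) = PySem.Chars.isspace c := by
  unfold PySem.Chars.lowerChar
  split
  · rename_i h
    simp [PySem.Chars.isupper, Char.le_def] at h
    obtain ⟨h1, h2⟩ := h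
    have h1' : 65 ≤ c.toNat := h1
    have h2' : c.toNat ≤ 90 := h2
    have hv : (c.toNat + 32).isValidChar := Or.inl (by omega)
    have ht : (Char.ofNat (c.toNat + 32)).toNat = c.toNat + 32 := by simp [Char.ofNat, hv]
    have hs1 : PySem.Chars.isspace (Char.ofNat (c.toNat + 32)) = false := by
      simp only [PySem.Chars.isspace, ht]
      simp only [Bool.or_eq_false_iff, Bool.and_eq_false_iff, decide_eq_false_iff_not]
      omega
    have hs2 : PySem.Chars.isspace c = false := by
      simp only [PySem.Chars.isspace]
      simp only [Bool.or_eq_false_iff, Bool.and_eq_false_iff, decide_eq_false_iff_not]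
      omega
    rw [hs1, hs2]
  · rfl

lemma pv_strip_lower_comm (l : List Char) :
    PySem.Chars.strip (PySem.Chars.lower l) = PySem.Chars.lower (PySem.Chars.strip l) := by
  have hf : (PySem.Chars.isspace ∘ PySem.Chars.lowerChar) = PySem.Chars.isspace :=
    funext pv_isspace_lowerChar
  simp only [PySem.Chars.strip, PySem.Chars.lstrip, PySem.Chars.rstrip, PySem.Chars.lower]
  rw [List.dropWhile_map, hf, ← List.map_reverse, List.dropWhile_map, hf, ← List.map_reverse]

lemma pv_foldl_two_checks (ms : List String) (P Q : String → Bool) (b : Bool) :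
    ms.foldl (fun ok m => if P m then false else if Q m then false else ok) b
      = (b && !ms.any fun m => P m || Q m) := by
  induction ms generalizing b with
  | nil => simp
  | cons m t ih =>
    rw [List.foldl_cons, ih, List.any_cons]
    cases P m <;> cases Q m <;> simp

lemma pv_markers_fact : ∀ m ∈ pvMarkers, m.toList ≠ [] ∧ m.toList.length ≤ 300 := by decide

lemma pv_window_take (L : List Char) :
    PySem.Chars.slice L none (some 300) = L.take 300 := by
  rw [PySem.Chars.slice_eq_listSlice, PySem.List.slice_to L (by norm_num)]
  have : (300:Int).toNat = 300 := rfl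
  rw [this]

lemma pv_isIn_window (m W : List Char) (hm : m ≠ []) :
    PySem.Chars.isIn m W = (List.range W.length).any fun i => PySem.Chars.startswith (W.drop i) m := by
  rw [Bool.eq_iff_iff]
  simp only [List.any_eq_true, List.mem_range, PySem.Chars.startswith_iff]
  rw [← PySem.Chars.exists_prefix_drop_iff_isIn]
  constructor
  · rintro ⟨j, hj⟩
    by_cases hlt : j < W.length
    · exact ⟨j, hlt, hj⟩
    · exfalso
      rw [List.drop_eq_nil_of_le (by omega)] at hj
      exact hm (List.prefix_nil.mp hj)
  · rintro ⟨i, _, hi⟩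
    exact ⟨i, hi⟩

-- Inserting into the empty trie yields exactly the prefix test for that word.
lemma pvMatch_insert_nil (m : List Char) (hm : m ≠ []) (s : List Char) :
    pvMatch (pvInsert .nil m) s = decide (m <+: s) := by
  induction m generalizing s with
  | nil => exact absurd rfl hm
  | cons c cs ih =>
    rw [pvInsert]
    cases s with
    | nil => simp [pvMatch]
    | cons d rest =>
      rw [pvMatch]
      by_cases hcd : d = c
      · subst hcd
        rw [if_pos rfl]
        cases hcs : cs with
        | nil => simp
        | cons e es =>
          rw [← hcs]
          have : cs ≠ [] := by simp [hcs]
          rw [ih this rest]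
          simp [List.cons_prefix_cons, hcs]
      · rw [if_neg hcd, pvMatch]
        have : ¬ (c :: cs <+: d :: rest) := by
          simp only [List.cons_prefix_cons, not_and]
          intro h; exact absurd h.symm hcd
        simp [this]

-- Inserting a word adds exactly its prefix test to what the trie already matches.
lemma pvMatch_insert (t : PvTrie) (m : List Char) (hm : m ≠ []) (s : List Char) :
    pvMatch (pvInsert t m) s = (pvMatch t s || decide (m <+: s)) := by
  induction t generalizing m s with
  | nil => rw [pvMatch_insert_nil m hm s]; simp [pvMatch]
  | node ch stop child sib ihc ihs =>
    cases m with
    | nil => exact absurd rfl hm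
    | cons c cs =>
      rw [pvInsert]
      by_cases hc : c = ch
      · rw [if_pos hc]
        cases s with
        | nil => simp [pvMatch]
        | cons d rest =>
          rw [pvMatch, pvMatch]
          by_cases hd : d = ch
          · rw [if_pos hd, if_pos hd]
            cases hcs : cs with
            | nil =>
              subst hc hd
              simp [List.cons_prefix_cons]
            | cons e es =>
              rw [← hcs]
              have hne : cs ≠ [] := by simp [hcs]
              rw [ihc cs hne rest]
              subst hc hd
              simp [List.cons_prefix_cons, hcs]
              cases stop <;> cases pvMatch child rest <;> simp
          · rw [if_neg hd, if_neg hd]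
            have : ¬ (c :: cs <+: d :: rest) := by
              simp only [List.cons_prefix_cons, not_and]
              intro h _; exact hd (h ▸ hc) |>.elim
            simp [this]
      · rw [if_neg hc]
        cases s with
        | nil => simp [pvMatch]
        | cons d rest =>
          rw [pvMatch, pvMatch]
          by_cases hd : d = ch
          · rw [if_pos hd, if_pos hd]
            have : ¬ (c :: cs <+: d :: rest) := by
              simp [List.cons_prefix_cons]
              intro h; exact absurd (h.trans hd) hc
            simp [this]
          · rw [if_neg hd, if_neg hd]
            exact ihs (c :: cs) hm (d :: rest)

-- The full trie matches s iff some marker is a prefix of s.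
lemma pvMatch_trie (s : List Char) :
    pvMatch pvTrie s = pvMarkers.any fun m => decide (m.toList <+: s) := by
  have key : ∀ (ms : List String), (∀ m ∈ ms, m.toList ≠ []) → ∀ (t : PvTrie),
      pvMatch (ms.foldl (fun t m => pvInsert t m.toList) t) s
        = (pvMatch t s || ms.any fun m => decide (m.toList <+: s)) := by
    intro ms
    induction ms with
    | nil => intro _ t; simp
    | cons m rest ih =>
      intro hne t
      rw [List.foldl_cons, ih (fun x hx => hne x (List.mem_cons_of_mem m hx)),
        pvMatch_insert t m.toList (hne m List.mem_cons_self), List.any_cons]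
      cases pvMatch t s <;> simp
  rw [pvTrie, key pvMarkers (fun m hm => (pv_markers_fact m hm).1) .nil]
  simp [pvMatch]

lemma pv_main (text : String) :
    section_has_content_py text = section_has_content_py_alt text := by
  unfold section_has_content_py section_has_content_py_alt
  by_cases hlen : (PySem.Chars.strip text.toList).length < 150
  · rw [if_pos, if_pos hlen]
    simp only [Bool.or_eq_true, beq_iff_eq, decide_eq_true_eq]
    by_cases he : text = ""
    · exact Or.inl he
    · right
      simp only [PySem.Str.len, PySem.Str.strip, String.toList_ofList]
      exact_mod_cast hlen
  · rw [if_neg, if_neg hlen]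
    · -- main bodies
      simp only [PySem.Str.startswith, PySem.Str.isIn, PySem.Str.slice, PySem.Str.strip,
        PySem.Str.lower, String.toList_ofList]
      rw [pv_foldl_two_checks, pv_strip_lower_comm]
      set L := PySem.Chars.lower (PySem.Chars.strip text.toList) with hL
      rw [Bool.true_and, pv_window_take L]
      have hQ : (pvMarkers.any fun m =>
          PySem.Chars.startswith L m.toList
            || PySem.Chars.isIn m.toList (L.take 300))
          = pvMarkers.any fun m => PySem.Chars.isIn m.toList (L.take 300) := by
        apply PySem.List.any_congr_mem
        intro m hmem
        obtain ⟨hne, hle⟩ := pv_markers_fact m hmem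
        cases hsw : PySem.Chars.startswith L m.toList
        · simp
        · have hpre : m.toList <+: L := (PySem.Chars.startswith_iff _ _).mp hsw
          have : PySem.Chars.isIn m.toList (L.take 300) = true := by
            rw [PySem.Chars.isIn_iff_infix]
            exact (List.prefix_take_iff.mpr ⟨hpre, hle⟩).isInfix
          simp [this]
      rw [hQ]
      have hswap : (pvMarkers.any fun m =>
            PySem.Chars.isIn m.toList (L.take 300))
          = (List.range (L.take 300).length).any fun i =>
              pvMatch pvTrie ((L.take 300).drop i) := by
        rw [Bool.eq_iff_iff]
        simp only [List.any_eq_true]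
        constructor
        · rintro ⟨m, hm, hin⟩
          rw [pv_isIn_window _ _ (pv_markers_fact m hm).1] at hin
          simp only [List.any_eq_true] at hin
          obtain ⟨i, hi, h⟩ := hin
          refine ⟨i, hi, ?_⟩
          rw [pvMatch_trie]
          simp only [List.any_eq_true]
          exact ⟨m, hm, by simpa [PySem.Chars.startswith_iff] using h⟩
        · rintro ⟨i, hi, h⟩
          rw [pvMatch_trie] at h
          simp only [List.any_eq_true, decide_eq_true_eq] at h
          obtain ⟨m, hm, hpre⟩ := h
          refine ⟨m, hm, ?_⟩
          rw [pv_isIn_window _ _ (pv_markers_fact m hm).1]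
          simp only [List.any_eq_true]
          exact ⟨i, hi, by simpa [PySem.Chars.startswith_iff] using hpre⟩
      rw [hswap]
    · -- A's condition is false
      simp only [Bool.or_eq_true, beq_iff_eq, decide_eq_true_eq, not_or]
      constructor
      · intro he
        apply hlen
        subst he
        simp [PySem.Chars.strip, PySem.Chars.lstrip, PySem.Chars.rstrip]
      · simp only [PySem.Str.len, PySem.Str.strip, String.toList_ofList]
        intro h
        exact hlen (by exact_mod_cast h)

-- ===== VERDICT (by name: the statement is the Claim_ definition above) =====
theorem section_has_content_py_spec : Claim_equal_section_has_content_py := by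
  intro text _
  exact pv_main text
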